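-- pv_equiv track=rewrite | github.com/ashley20040126/DSA_LearningMaterial | 05_搜索与查找/01_二分查找.py | minimum_days_to_bloom
-- ===== SOURCE A (Python) =====
-- from typing import List
--
-- def minimum_days_to_bloom(bloomDay: List[int], m: int, k: int) -> int:
--     """
--     【题型】制作 m 束花，每束需要 k 朵连续的花，求最少等待天数。
--     【思路】对天数 d 二分，判断等 d 天后能否制作 m 束花。
--     """
--     def can_make(d: int) -> bool:
--         flowers = bunches = 0
--         for day in bloomDay:
--             if day <= d:
--                 flowers += 1
--                 if flowers == k:
--                     bunches += 1
--                     flowers = 0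
--             else:
--                 flowers = 0  # 连续中断
--         return bunches >= m
--
--     if len(bloomDay) < m * k:
--         return -1
--
--     left, right = min(bloomDay), max(bloomDay)
--     while left < right:
--         mid = left + (right - left) // 2
--         if can_make(mid):
--             right = mid
--         else:
--             left = mid + 1
--
--     return left
-- ===== SOURCE B (Python) =====
-- from typing import List
--
-- def minimum_days_to_bloom(bloomDay: List[int], m: int, k: int) -> int:
--     # Sweep the distinct bloom days in increasing order; for each candidate day
--     # count bunches as the sum of floor(runLength/k) over maximal runs of
--     # bloomed flowers, and return the first day reaching m bunches.
--     if len(bloomDay) < m * k: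
--         return -1
--     for d in sorted(set(bloomDay)):
--         run = total = 0
--         for day in bloomDay:
--             if day <= d:
--                 run += 1
--             else:
--                 total += run // k
--                 run = 0
--         if total + run // k >= m:
--             return d
--     return -1
-- ===== Notes on version B (the rewrite author's own statement) =====
-- stated objective: alternative
-- what changed: Replaces binary search over the day range with repeated greedy feasibility checks by a single linear scan over the sorted distinct bloom days, each candidate checked by summing floor(runLength/k) over maximal runs instead of the reset-counter greedy.
-- outside the precondition, e.g. on minimum_days_to_bloom([5], 1, 0): A returns 5, B raises ZeroDivisionError; on minimum_days_to_bloom([5], 1, -1): A returns 5, B returns -1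
import Mathlib
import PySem

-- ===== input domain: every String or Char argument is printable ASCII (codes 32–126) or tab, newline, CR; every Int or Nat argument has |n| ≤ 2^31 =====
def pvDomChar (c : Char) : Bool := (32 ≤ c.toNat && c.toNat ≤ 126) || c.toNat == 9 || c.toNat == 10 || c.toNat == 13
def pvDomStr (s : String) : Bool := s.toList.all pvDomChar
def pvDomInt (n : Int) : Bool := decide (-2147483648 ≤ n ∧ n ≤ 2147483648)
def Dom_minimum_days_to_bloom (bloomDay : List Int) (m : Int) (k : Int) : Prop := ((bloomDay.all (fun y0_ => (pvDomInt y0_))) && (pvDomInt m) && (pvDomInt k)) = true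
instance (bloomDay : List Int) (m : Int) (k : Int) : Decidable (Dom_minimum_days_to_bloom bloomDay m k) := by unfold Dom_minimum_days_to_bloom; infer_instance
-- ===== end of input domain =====

-- B replaces A's binary search over the day range by one scan of the sorted distinct
-- bloom days with a run-splitting bunch count (alternative algorithm, similar cost).


-- ===== PORT A =====
-- inner helper can_make(d)
def pvCanMake (bloomDay : List Int) (m k d : Int) : Bool :=
  let s := bloomDay.foldl
    (fun (st : Int × Int) day =>
      if day ≤ d then
        if st.1 + 1 = k then (0, st.2 + 1) else (st.1 + 1, st.2)
      else (0, st.2)) (0, 0)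
  decide (m ≤ s.2)

-- the while-loop 'while left < right: …'
def pvBS (bloomDay : List Int) (m k : Int) (left right : Int) : Int :=
  if _h : left < right then
    let mid := left + PySem.Int.floordiv (right - left) 2
    if pvCanMake bloomDay m k mid then pvBS bloomDay m k left mid
    else pvBS bloomDay m k (mid + 1) right
  else left
termination_by (right - left).toNat
decreasing_by
  all_goals
    rw [PySem.Int.floordiv_eq_ediv_of_pos (by omega : (0:Int) < 2)]
    omega

def minimum_days_to_bloom (bloomDay : List Int) (m : Int) (k : Int) : Int :=
  if (bloomDay.length : Int) < m * k then -1
  else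
    match PySem.List.min? bloomDay (fun x => x), PySem.List.max? bloomDay (fun x => x) with
    | some left, some right => pvBS bloomDay m k left right
    | _, _ => 0  -- min()/max() of an empty list raise ValueError; unreachable under Pre_

-- ===== PORT B =====
-- the inner counting loop plus the final 'total + run // k'
def pvCountB (bloomDay : List Int) (k d : Int) : Int :=
  let s := bloomDay.foldl
    (fun (st : Int × Int) day =>
      if day ≤ d then (st.1 + 1, st.2)
      else (0, st.2 + PySem.Int.floordiv st.1 k)) (0, 0)
  s.2 + PySem.Int.floordiv s.1 k

-- the 'for d in sorted(set(bloomDay)):' scan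
def pvScan (bloomDay : List Int) (m k : Int) : List Int → Int
  | [] => -1
  | d :: ds => if m ≤ pvCountB bloomDay k d then d else pvScan bloomDay m k ds

def minimum_days_to_bloom_alt (bloomDay : List Int) (m : Int) (k : Int) : Int :=
  if (bloomDay.length : Int) < m * k then -1
  else pvScan bloomDay m k (PySem.List.sorted (PySem.Set.ofList bloomDay) (fun x => x) false)

-- ===== PRECONDITION & SPEC =====
-- Pre_ requires a positive bunch size k (for k ≤ 0 A's returned value, the max or min
-- of the list, is an accident of a bunch counter that can never fire, and B's run count
-- divides by k) and excludes the empty list with m ≤ 0, where A raises ValueError on min([]).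
def Pre_minimum_days_to_bloom (bloomDay : List Int) (m : Int) (k : Int) : Prop :=
  1 ≤ k ∧ (1 ≤ m ∨ bloomDay ≠ [])
instance (bloomDay : List Int) (m : Int) (k : Int) : Decidable (Pre_minimum_days_to_bloom bloomDay m k) := by unfold Pre_minimum_days_to_bloom; infer_instance
def pvWitness_minimum_days_to_bloom : List Int × Int × Int := ([1, 3, 2], 1, 2)

def Spec_minimum_days_to_bloom (bloomDay : List Int) (m : Int) (k : Int) (out : Int) : Prop := out = minimum_days_to_bloom_alt bloomDay m k
instance (bloomDay : List Int) (m : Int) (k : Int) (out : Int) : Decidable (Spec_minimum_days_to_bloom bloomDay m k out) := by unfold Spec_minimum_days_to_bloom; infer_instance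

-- ===== CLAIM (what is proved, stated in full; the proofs are below) =====
def Claim_equal_minimum_days_to_bloom : Prop := ∀ (bloomDay : List Int) (m : Int) (k : Int), Dom_minimum_days_to_bloom bloomDay m k → Pre_minimum_days_to_bloom bloomDay m k → Spec_minimum_days_to_bloom bloomDay m k (minimum_days_to_bloom bloomDay m k)

-- ===== LEMMAS AND PROOFS =====

-- A's greedy bunch count as a function
def pvCountA (bloomDay : List Int) (k d : Int) : Int :=
  (bloomDay.foldl
    (fun (st : Int × Int) day =>
      if day ≤ d then
        if st.1 + 1 = k then (0, st.2 + 1) else (st.1 + 1, st.2)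
      else (0, st.2)) (0, 0)).2

theorem pvCanMake_eq (bloomDay : List Int) (m k d : Int) :
    pvCanMake bloomDay m k d = decide (m ≤ pvCountA bloomDay k d) := rfl

-- A's bunch counter never decreases below 0
theorem countA_nonneg_aux (k d : Int) :
    ∀ (xs : List Int) (st : Int × Int), 0 ≤ st.2 →
      0 ≤ (xs.foldl
        (fun (st : Int × Int) day =>
          if day ≤ d then
            if st.1 + 1 = k then (0, st.2 + 1) else (st.1 + 1, st.2)
          else (0, st.2)) st).2 := by
  intro xs
  induction xs with
  | nil => intro st h; exact h
  | cons day xs ih =>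
    intro st h
    simp only [List.foldl_cons]
    by_cases hd : day ≤ d
    · by_cases e : st.1 + 1 = k
      · simp only [if_pos hd, if_pos e]; exact ih _ (by simp; omega)
      · simp only [if_pos hd, if_neg e]; exact ih _ h
    · simp only [if_neg hd]; exact ih _ h

theorem countA_nonneg (bloomDay : List Int) (k d : Int) : 0 ≤ pvCountA bloomDay k d := by
  unfold pvCountA
  exact countA_nonneg_aux k d bloomDay (0, 0) (by norm_num)

-- B's count with Lean's ediv (equal to the port's floordiv for k > 0)
def pvCountB' (bloomDay : List Int) (k d : Int) : Int :=
  let s := bloomDay.foldl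
    (fun (st : Int × Int) day =>
      if day ≤ d then (st.1 + 1, st.2)
      else (0, st.2 + st.1 / k)) (0, 0)
  s.2 + s.1 / k

theorem pvCountB_eq (bloomDay : List Int) (k d : Int) (hk : 1 ≤ k) :
    pvCountB bloomDay k d = pvCountB' bloomDay k d := by
  unfold pvCountB pvCountB'
  simp only [PySem.Int.floordiv_eq_ediv_of_pos (by omega : (0:Int) < k)]

-- ===== count_eq : A's reset-counter greedy equals B's run-splitting sum =====
theorem emod_succ_of_eq (k r : Int) (hk : 1 ≤ k) (hr : 0 ≤ r) (h : r % k + 1 = k) :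
    (r + 1) % k = 0 ∧ (r + 1) / k = r / k + 1 := by
  have h1 := Int.emod_add_mul_ediv r k
  have h2 : (0:Int) + k * (r / k + 1) = r + 1 := by rw [Int.mul_add, Int.mul_one]; omega
  have h3 := (Int.ediv_emod_unique (by omega : (0:Int) < k)).mpr ⟨h2, le_refl 0, by omega⟩
  exact ⟨h3.2, h3.1⟩

theorem emod_succ_of_ne (k r : Int) (hk : 1 ≤ k) (hr : 0 ≤ r) (h : r % k + 1 ≠ k) :
    (r + 1) % k = r % k + 1 ∧ (r + 1) / k = r / k := by
  have h1 := Int.emod_add_mul_ediv r k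
  have hlt : r % k < k := Int.emod_lt_of_pos r (by omega)
  have hge : 0 ≤ r % k := Int.emod_nonneg r (by omega)
  have h3 := (Int.ediv_emod_unique (by omega : (0:Int) < k)).mpr
    (⟨by omega, by omega, by omega⟩ : r % k + 1 + k * (r / k) = r + 1 ∧ 0 ≤ r % k + 1 ∧ r % k + 1 < k)
  exact ⟨h3.2, h3.1⟩

theorem count_rel (k d : Int) (hk : 1 ≤ k) :
    ∀ (xs : List Int) (r t : Int), 0 ≤ r →
      (xs.foldl
        (fun (st : Int × Int) day =>
          if day ≤ d then
            if st.1 + 1 = k then (0, st.2 + 1) else (st.1 + 1, st.2)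
          else (0, st.2)) (r % k, t + r / k)).2 =
      (let s := xs.foldl
        (fun (st : Int × Int) day =>
          if day ≤ d then (st.1 + 1, st.2)
          else (0, st.2 + st.1 / k)) (r, t)
       s.2 + s.1 / k) := by
  intro xs
  induction xs with
  | nil => intro r t hr; simp
  | cons day xs ih =>
    intro r t hr
    simp only [List.foldl_cons]
    by_cases hday : day ≤ d
    · simp only [if_pos hday]
      by_cases hroll : r % k + 1 = k
      · have h := emod_succ_of_eq k r hk hr hroll
        have := ih (r + 1) t (by omega)
        simp only [if_pos hroll]
        rw [show ((0 : Int), t + r / k + 1) = ((r+1) % k, t + (r+1) / k) by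
          rw [h.1, h.2]; ring_nf]
        exact this
      · have h := emod_succ_of_ne k r hk hr hroll
        have := ih (r + 1) t (by omega)
        simp only [if_neg hroll]
        rw [show ((r % k + 1 : Int), t + r / k) = ((r+1) % k, t + (r+1) / k) by
          rw [h.1, h.2]]
        exact this
    · simp only [if_neg hday]
      have := ih 0 (t + r / k) (by omega)
      simpa using this

theorem count_eq (bloomDay : List Int) (k d : Int) (hk : 1 ≤ k) :
    pvCountA bloomDay k d = pvCountB' bloomDay k d := by
  unfold pvCountA pvCountB'
  have := count_rel k d hk bloomDay 0 0 (by omega)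
  simpa using this

-- ===== monotonicity of A's count in d =====
theorem count_mono_aux (k d d' : Int) (hk : 1 ≤ k) (hdd' : d ≤ d') :
    ∀ (xs : List Int) (f b f' b' : Int),
      0 ≤ f → f < k → 0 ≤ f' → f' < k → b ≤ b' → (b = b' → f ≤ f') →
      (let s := xs.foldl
        (fun (st : Int × Int) day =>
          if day ≤ d then
            if st.1 + 1 = k then (0, st.2 + 1) else (st.1 + 1, st.2)
          else (0, st.2)) (f, b)
       let s' := xs.foldl
        (fun (st : Int × Int) day =>
          if day ≤ d' then
            if st.1 + 1 = k then (0, st.2 + 1) else (st.1 + 1, st.2)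
          else (0, st.2)) (f', b')
       0 ≤ s.1 ∧ s.1 < k ∧ 0 ≤ s'.1 ∧ s'.1 < k ∧ s.2 ≤ s'.2 ∧ (s.2 = s'.2 → s.1 ≤ s'.1)) := by
  intro xs
  induction xs with
  | nil => intro f b f' b' h1 h2 h3 h4 h5 h6; exact ⟨h1, h2, h3, h4, h5, h6⟩
  | cons day xs ih =>
    intro f b f' b' h1 h2 h3 h4 h5 h6
    simp only [List.foldl_cons]
    by_cases hd : day ≤ d
    · have hd' : day ≤ d' := le_trans hd hdd'
      simp only [if_pos hd, if_pos hd']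
      by_cases e : f + 1 = k
      · by_cases e' : f' + 1 = k
        · simp only [if_pos e, if_pos e']
          apply ih <;> omega
        · simp only [if_pos e, if_neg e']
          apply ih <;> omega
      · by_cases e' : f' + 1 = k
        · simp only [if_neg e, if_pos e']
          apply ih <;> omega
        · simp only [if_neg e, if_neg e']
          apply ih <;> omega
    · simp only [if_neg hd]
      by_cases hd' : day ≤ d'
      · simp only [if_pos hd']
        by_cases e' : f' + 1 = k
        · simp only [if_pos e']
          apply ih <;> omega
        · simp only [if_neg e']
          apply ih <;> omega
      · simp only [if_neg hd']
        apply ih <;> omega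

theorem count_mono (bloomDay : List Int) (k d d' : Int) (hk : 1 ≤ k) (hdd' : d ≤ d') :
    pvCountA bloomDay k d ≤ pvCountA bloomDay k d' := by
  unfold pvCountA
  have := count_mono_aux k d d' hk hdd' bloomDay 0 0 0 0
    (by omega) (by omega) (by omega) (by omega) (by omega) (by omega)
  exact this.2.2.2.2.1

-- ===== feasibility at the maximum day =====
theorem foldB_all_pass (k d : Int) :
    ∀ (xs : List Int) (r t : Int), (∀ day ∈ xs, day ≤ d) →
      xs.foldl
        (fun (st : Int × Int) day =>
          if day ≤ d then (st.1 + 1, st.2)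
          else (0, st.2 + st.1 / k)) (r, t) = (r + (xs.length : Int), t) := by
  intro xs
  induction xs with
  | nil => intro r t _; simp
  | cons day xs ih =>
    intro r t h
    simp only [List.foldl_cons, if_pos (h day (by simp))]
    rw [ih (r + 1) t (fun y hy => h y (by simp [hy]))]
    congr 1
    push_cast [List.length_cons]
    ring

theorem can_at_max (bloomDay : List Int) (m k d : Int) (hk : 1 ≤ k)
    (hall : ∀ day ∈ bloomDay, day ≤ d) (hlen : m * k ≤ (bloomDay.length : Int)) :
    m ≤ pvCountA bloomDay k d := by
  rw [count_eq bloomDay k d hk]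
  unfold pvCountB'
  rw [foldB_all_pass k d bloomDay 0 0 hall]
  have := (Int.le_ediv_iff_mul_le (by omega : (0:Int) < k)).mpr hlen
  simpa using this

-- ===== the count only changes at values in the list =====
theorem count_insensitive (k d : Int) :
    ∀ (xs : List Int) (st : Int × Int), (∀ day ∈ xs, day ≠ d) →
      xs.foldl
        (fun (st : Int × Int) day =>
          if day ≤ d then
            if st.1 + 1 = k then (0, st.2 + 1) else (st.1 + 1, st.2)
          else (0, st.2)) st =
      xs.foldl
        (fun (st : Int × Int) day =>
          if day ≤ d - 1 then
            if st.1 + 1 = k then (0, st.2 + 1) else (st.1 + 1, st.2)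
          else (0, st.2)) st := by
  intro xs
  induction xs with
  | nil => intro st _; rfl
  | cons day xs ih =>
    intro st h
    have hne : day ≠ d := h day (by simp)
    have : (day ≤ d) = (day ≤ d - 1) := by
      exact propext (by omega)
    simp only [List.foldl_cons, this]
    exact ih _ (fun y hy => h y (by simp [hy]))

theorem count_eq_pred (bloomDay : List Int) (k d : Int)
    (h : ∀ day ∈ bloomDay, day ≠ d) :
    pvCountA bloomDay k d = pvCountA bloomDay k (d - 1) := by
  unfold pvCountA
  rw [count_insensitive k d bloomDay (0, 0) h]

-- ===== binary-search correctness =====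
theorem pvBS_spec (bloomDay : List Int) (m k : Int) (hk : 1 ≤ k) :
    ∀ (l r : Int), l ≤ r → m ≤ pvCountA bloomDay k r →
      l ≤ pvBS bloomDay m k l r ∧ pvBS bloomDay m k l r ≤ r ∧
      m ≤ pvCountA bloomDay k (pvBS bloomDay m k l r) ∧
      ∀ d, l ≤ d → d < pvBS bloomDay m k l r → ¬ m ≤ pvCountA bloomDay k d := by
  intro l r
  induction l, r using pvBS.induct bloomDay m k with
  | case1 l r hlt mid hcan ih =>
    intro _ hr
    rw [pvBS, dif_pos hlt, if_pos hcan]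
    have hmid : l ≤ mid ∧ mid < r := by
      constructor <;>
      · have : mid = l + (r - l) / 2 := by
          simp only [mid, PySem.Int.floordiv_eq_ediv_of_pos (by omega : (0:Int) < 2)]
        omega
    have hcan' : m ≤ pvCountA bloomDay k mid := by
      rw [pvCanMake_eq] at hcan; exact of_decide_eq_true hcan
    rw [show l + PySem.Int.floordiv (r - l) 2 = mid from rfl]
    obtain ⟨i1, i2, i3, i4⟩ := ih hmid.1 hcan'
    exact ⟨i1, by omega, i3, i4⟩
  | case2 l r hlt mid hcan ih =>
    intro _ hr
    rw [pvBS, dif_pos hlt, if_neg hcan]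
    have hmid : l ≤ mid ∧ mid < r := by
      constructor <;>
      · have : mid = l + (r - l) / 2 := by
          simp only [mid, PySem.Int.floordiv_eq_ediv_of_pos (by omega : (0:Int) < 2)]
        omega
    have hnot : ¬ m ≤ pvCountA bloomDay k mid := by
      rw [pvCanMake_eq] at hcan
      intro hc; exact hcan (decide_eq_true hc)
    rw [show l + PySem.Int.floordiv (r - l) 2 = mid from rfl]
    obtain ⟨i1, i2, i3, i4⟩ := ih (by omega) hr
    refine ⟨by omega, i2, i3, ?_⟩
    intro d hd1 hd2
    by_cases hdm : d ≤ mid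
    · intro hc
      exact hnot (le_trans hc (count_mono bloomDay k d mid hk hdm))
    · exact i4 d (by omega) hd2
  | case3 l r hnlt =>
    intro hle hr
    rw [pvBS, dif_neg hnlt]
    have hlr : l = r := by omega
    refine ⟨le_refl l, hle, ?_, ?_⟩
    · rw [hlr]; exact hr
    · intro d h1 h2; omega

-- ===== scan correctness =====
theorem pvScan_spec (bloomDay : List Int) (m k : Int) (hk : 1 ≤ k) (x : Int)
    (hx : m ≤ pvCountB bloomDay k x) :
    ∀ (l : List Int), l.Pairwise (· < ·) → x ∈ l →
      (∀ y ∈ l, y < x → ¬ m ≤ pvCountB bloomDay k y) →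
      pvScan bloomDay m k l = x := by
  intro l
  induction l with
  | nil => intro _ hmem _; exact absurd hmem (by simp)
  | cons a as ih =>
    intro hpw hmem hlt
    rw [pvScan]
    by_cases hax : a = x
    · subst hax
      rw [if_pos hx]
    · have hxas : x ∈ as := by
        rcases List.mem_cons.mp hmem with h | h
        · exact absurd h.symm hax
        · exact h
      have halt : a < x := (List.pairwise_cons.mp hpw).1 x hxas
      rw [if_neg (hlt a (by simp) halt)]
      exact ih (List.pairwise_cons.mp hpw).2 hxas
        (fun y hy hyx => hlt y (by simp [hy]) hyx)

-- ===== VERDICT (by name: the statement is the Claim_ definition above) =====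
theorem minimum_days_to_bloom_spec : Claim_equal_minimum_days_to_bloom := by
  intro bloomDay m k _hdom hpre
  obtain ⟨hk, hm⟩ := hpre
  unfold Spec_minimum_days_to_bloom minimum_days_to_bloom minimum_days_to_bloom_alt
  by_cases hlen : (bloomDay.length : Int) < m * k
  · rw [if_pos hlen, if_pos hlen]
  · rw [if_neg hlen, if_neg hlen]
    have hne : bloomDay ≠ [] := by
      rcases hm with hm | hm
      · have hmk : 1 ≤ m * k := by nlinarith
        intro h; subst h; simp at hlen; omega
      · exact hm
    obtain ⟨mn, hmn⟩ : ∃ mn, PySem.List.min? bloomDay (fun x => x) = some mn := by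
      cases hq : PySem.List.min? bloomDay (fun x => x) with
      | none => exact absurd ((PySem.List.min?_eq_none_iff bloomDay (fun x => x)).mp hq) hne
      | some v => exact ⟨v, rfl⟩
    obtain ⟨mx, hmx⟩ : ∃ mx, PySem.List.max? bloomDay (fun x => x) = some mx := by
      cases hq : PySem.List.max? bloomDay (fun x => x) with
      | none => exact absurd ((PySem.List.max?_eq_none_iff bloomDay (fun x => x)).mp hq) hne
      | some v => exact ⟨v, rfl⟩
    rw [hmn, hmx]
    have hmn_mem : mn ∈ bloomDay := PySem.List.min?_mem hmn
    have hmx_mem : mx ∈ bloomDay := PySem.List.max?_mem hmx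
    have hmn_min : ∀ y ∈ bloomDay, mn ≤ y := fun y hy => PySem.List.min?_isMin hmn y hy
    have hmx_max : ∀ y ∈ bloomDay, y ≤ mx := fun y hy => PySem.List.max?_isMax hmx y hy
    have hcanr : m ≤ pvCountA bloomDay k mx := by
      by_cases hm1 : 1 ≤ m
      · exact can_at_max bloomDay m k mx hk hmx_max (by omega)
      · have := countA_nonneg bloomDay k mx; omega
    obtain ⟨b1, b2, b3, b4⟩ :=
      pvBS_spec bloomDay m k hk mn mx (hmn_min mx hmx_mem) hcanr
    set res := pvBS bloomDay m k mn mx with hres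
    -- res is a value occurring in bloomDay
    have hres_mem : res ∈ bloomDay := by
      by_contra hnm
      have hneq : ∀ day ∈ bloomDay, day ≠ res := by
        intro day hday he; exact hnm (he ▸ hday)
      have hpred : pvCountA bloomDay k res = pvCountA bloomDay k (res - 1) :=
        count_eq_pred bloomDay k res hneq
      have hresne : res ≠ mn := fun he => hnm (he ▸ hmn_mem)
      have : ¬ m ≤ pvCountA bloomDay k (res - 1) := b4 (res - 1) (by omega) (by omega)
      rw [hpred] at b3; exact this b3
    -- the scan returns res
    have hsorted_pw := PySem.List.sorted_ofList_pairwise_lt (xs := bloomDay)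
    have hmem_sorted : ∀ y : Int,
        (y ∈ PySem.List.sorted (PySem.Set.ofList bloomDay) (fun x => x) false) ↔ y ∈ bloomDay := by
      intro y
      rw [PySem.List.mem_sorted]
      exact PySem.Set.mem_ofList bloomDay y
    have hcntB : m ≤ pvCountB bloomDay k res := by
      rw [pvCountB_eq bloomDay k res hk, ← count_eq bloomDay k res hk]; exact b3
    rw [pvScan_spec bloomDay m k hk res hcntB
      (PySem.List.sorted (PySem.Set.ofList bloomDay) (fun x => x) false)
      hsorted_pw ((hmem_sorted res).mpr hres_mem) ?_]
    intro y hy hylt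
    have hy' : y ∈ bloomDay := (hmem_sorted y).mp hy
    intro hc
    have : ¬ m ≤ pvCountA bloomDay k y := b4 y (hmn_min y hy') hylt
    rw [pvCountB_eq bloomDay k y hk, ← count_eq bloomDay k y hk] at hc
    exact this hc
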